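-- pv_equiv track=rewrite | github.com/mattblferrer/leetcode | 2595.py | evenOddBit
-- ===== SOURCE A (Python) =====
-- def evenOddBit(n: int) -> list[int]:
--     power = 0
--     even, odd = 0, 0  # even and odd bits counter
--     while n > 0:
--         if n % 2 == 1:  # bit at index (power)
--             if power % 2 == 0:
--                 even += 1
--             else:
--                 odd += 1
--         n //= 2
--         power += 1
--
--     return [even, odd]
-- ===== SOURCE B (Python) =====
-- def evenOddBit(n: int) -> list[int]:
--     def go(m):
--         # (even-index 1-bits, odd-index 1-bits) of m; shifting by one swaps the roles
--         if m <= 0: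
--             return (0, 0)
--         o, e = go(m >> 1)
--         return (e + (m & 1), o)
--     e, o = go(n)
--     return [e, o]
-- ===== Notes on version B (the rewrite author's own statement) =====
-- stated objective: alternative
-- what changed: Replaces the iterative loop that tracks an absolute bit-index counter and two accumulators with a recursive decomposition that returns the (even,odd) pair for the shifted number and swaps its components, so no position counter or parity test is needed.
import Mathlib
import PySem

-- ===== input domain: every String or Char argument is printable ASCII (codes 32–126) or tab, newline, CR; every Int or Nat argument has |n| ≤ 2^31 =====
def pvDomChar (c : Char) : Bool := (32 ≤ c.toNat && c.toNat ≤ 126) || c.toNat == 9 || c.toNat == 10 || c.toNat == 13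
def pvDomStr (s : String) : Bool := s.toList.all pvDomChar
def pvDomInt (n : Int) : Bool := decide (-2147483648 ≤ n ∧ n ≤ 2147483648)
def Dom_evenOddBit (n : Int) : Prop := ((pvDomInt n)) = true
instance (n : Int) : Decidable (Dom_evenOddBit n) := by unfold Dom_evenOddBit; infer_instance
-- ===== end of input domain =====

-- B is an alternative recursive decomposition: it returns the (even,odd) pair of the
-- half-shifted number and swaps the components, instead of A's loop with a bit-index counter.

-- ===== PORT A =====
-- while n > 0: classify bit by parity of `power`, then n //= 2, power += 1
def evenOddBitLoop (n power even odd : Int) : List Int :=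
  if _h : 0 < n then
    let (even', odd') :=
      if PySem.Int.mod n 2 = 1 then
        if PySem.Int.mod power 2 = 0 then (even + 1, odd) else (even, odd + 1)
      else (even, odd)
    evenOddBitLoop (PySem.Int.floordiv n 2) (power + 1) even' odd'
  else [even, odd]
termination_by n.toNat
decreasing_by
  simp only [PySem.Int.floordiv, Int.fdiv_eq_ediv]
  omega

def evenOddBit (n : Int) : List Int := evenOddBitLoop n 0 0 0

-- ===== PORT B =====
-- go(m) = (even-index 1-bits, odd-index 1-bits) of m; shift swaps the pair
def goB (m : Int) : Int × Int :=
  if _h : m ≤ 0 then (0, 0)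
  else
    let p := goB (m >>> (1 : Nat))
    (p.2 + PySem.Int.band m 1, p.1)
termination_by m.toNat
decreasing_by
  simp only [Int.shiftRight_eq_div_pow]
  omega

def evenOddBit_alt (n : Int) : List Int :=
  let p := goB n
  [p.1, p.2]

-- ===== PRECONDITION & SPEC =====
def Spec_evenOddBit (n : Int) (out : List Int) : Prop := out = evenOddBit_alt n
instance (n : Int) (out : List Int) : Decidable (Spec_evenOddBit n out) := by unfold Spec_evenOddBit; infer_instance

-- ===== CLAIM (what is proved, stated in full; the proofs are below) =====
def Claim_equal_evenOddBit : Prop := ∀ (n : Int), Dom_evenOddBit n → Spec_evenOddBit n (evenOddBit n)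

-- ===== LEMMAS AND PROOFS =====

theorem loop_eq_goB (k : Nat) : ∀ (m : Int), m.toNat ≤ k → ∀ (p e o : Int),
    evenOddBitLoop m p e o =
      if PySem.Int.mod p 2 = 0 then [e + (goB m).1, o + (goB m).2]
      else [e + (goB m).2, o + (goB m).1] := by
  induction k with
  | zero =>
    intro m hm p e o
    have hm' : m ≤ 0 := by omega
    rw [evenOddBitLoop, goB]
    simp [hm', not_lt.mpr hm']
  | succ k ih =>
    intro m hm p e o
    by_cases h : 0 < m
    · have h2 : ¬ m ≤ 0 := by omega
      have hsh : m >>> (1 : Nat) = m / 2 := by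
        rw [Int.shiftRight_eq_div_pow]; norm_num
      have hfd : PySem.Int.floordiv m 2 = m / 2 := by
        simp [PySem.Int.floordiv, Int.fdiv_eq_ediv]
      have hmod : PySem.Int.mod m 2 = m % 2 := by
        simp [PySem.Int.mod, Int.fmod_eq_emod]
      have hmodp : PySem.Int.mod p 2 = p % 2 := by
        simp [PySem.Int.mod, Int.fmod_eq_emod]
      have hmodp1 : PySem.Int.mod (p + 1) 2 = (p + 1) % 2 := by
        simp [PySem.Int.mod, Int.fmod_eq_emod]
      have hb1 : PySem.Int.band m 1 = PySem.Int.mod m 2 := PySem.Int.band_one m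
      have hk : (m / 2).toNat ≤ k := by omega
      rw [evenOddBitLoop, goB]
      simp only [h, h2, dite_true, dite_false, hfd, hsh, hb1, hmod, hmodp]
      rw [ih (m / 2) hk (p + 1)]
      simp only [hmodp1]
      have hm2 : m % 2 = 0 ∨ m % 2 = 1 := by omega
      have hp2 : p % 2 = 0 ∨ p % 2 = 1 := by omega
      rcases hm2 with hm2 | hm2 <;> rcases hp2 with hp2 | hp2 <;>
        simp [hm2, hp2, Int.add_emod, List.cons.injEq] <;> ring
    · have hm' : m ≤ 0 := by omega
      rw [evenOddBitLoop, goB]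
      simp [hm', not_lt.mpr hm']

-- ===== VERDICT (by name: the statement is the Claim_ definition above) =====
theorem evenOddBit_spec : Claim_equal_evenOddBit := by
  intro n _
  unfold Spec_evenOddBit evenOddBit evenOddBit_alt
  rw [loop_eq_goB n.toNat n le_rfl 0 0 0]
  simp [PySem.Int.mod]
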